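-- pv_equiv track=rewrite | github.com/DancingOnAir/LeetcodePythonSolution | string/1418_display_table_of_food_orders_in_a_restaurant.py | displayTable1
-- ===== SOURCE A (Python) =====
-- from typing import List
-- from collections import defaultdict, Counter
--
-- def displayTable1(orders: List[List[str]]) -> List[List[str]]:
--     title = set()
--     items = defaultdict(lambda: defaultdict(int))
--
--     for i in range(len(orders)):
--         title.add(orders[i][2])
--         items[orders[i][1]][orders[i][2]] += 1
--
--     res = list()
--     title = sorted(title)
--     res.append(["Table"] + title)
--
--     for tbl_num, v in sorted(items.items(), key=lambda x: int(x[0])):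
--         cur_table = [tbl_num]
--         for item_name in title:
--             if item_name in v:
--                 cur_table.append(str(v[item_name]))
--             else:
--                 cur_table.append("0")
--         res.append(cur_table)
--
--     return res
-- ===== SOURCE B (Python) =====
-- from typing import List
--
--
-- def displayTable1(orders: List[List[str]]) -> List[List[str]]:
--     foods = sorted({o[2] for o in orders})
--     tables = []
--     for o in orders:
--         if o[1] not in tables:
--             tables.append(o[1])
--     tables.sort(key=int)
--     res = [["Table"] + foods]
--     for t in tables:
--         res.append([t] + [str(sum(1 for o in orders if o[1] == t and o[2] == f))
--                           for f in foods])
--     return res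
-- ===== Notes on version B (the rewrite author's own statement) =====
-- stated objective: alternative
-- what changed: B drops A's nested defaultdict-of-counters and per-cell membership test: it dedups and sorts the food names and table ids up front, then fills each cell by directly counting the matching orders in one scan per cell.
import Mathlib
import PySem

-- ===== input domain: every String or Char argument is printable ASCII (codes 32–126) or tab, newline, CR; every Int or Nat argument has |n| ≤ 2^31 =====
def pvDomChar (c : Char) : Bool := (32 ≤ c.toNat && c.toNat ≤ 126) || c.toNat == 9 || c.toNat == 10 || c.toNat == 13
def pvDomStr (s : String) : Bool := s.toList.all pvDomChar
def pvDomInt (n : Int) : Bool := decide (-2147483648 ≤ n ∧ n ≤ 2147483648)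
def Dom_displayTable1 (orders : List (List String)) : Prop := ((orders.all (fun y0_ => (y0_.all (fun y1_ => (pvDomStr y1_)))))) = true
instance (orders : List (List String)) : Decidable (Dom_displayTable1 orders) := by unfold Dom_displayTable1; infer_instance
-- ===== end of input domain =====

-- B replaces A's nested defaultdict counting + per-cell membership test by sorted dedup'd
-- key lists and a direct count of matching orders per cell (objective: alternative, not faster).

-- o[i] for an order row; inside Pre_ the index is always in range so the default "" is never taken
def pyAt (o : List String) (i : Int) : String := PySem.List.pyGetD o i ""

-- ===== PORT A =====
-- loop body of A's single pass: title.add(orders[i][2]); items[orders[i][1]][orders[i][2]] += 1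
def stepA (acc : PySem.Set String × PySem.Dict String (PySem.Dict String Int))
    (o : List String) : PySem.Set String × PySem.Dict String (PySem.Dict String Int) :=
  (PySem.Set.add acc.1 (pyAt o 2),
   acc.2.modify (pyAt o 1) PySem.Dict.empty (fun m => m.modify (pyAt o 2) 0 (· + 1)))

def displayTable1 (orders : List (List String)) : List (List String) :=
  let st := (PySem.List.pyRange 0 (PySem.List.len orders)).foldl
      (fun acc i => stepA acc (PySem.List.pyGetD orders i []))
      (PySem.Set.empty, PySem.Dict.empty)
  let title := PySem.List.sorted st.1 (fun x => x)
  (PySem.List.sorted st.2.items (fun p => (PySem.Int.ofStr? p.1).getD 0)).foldl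
    (fun res p =>
      res ++ [ title.foldl
        (fun cur f => cur ++ [if p.2.contains f then PySem.Int.toStr (p.2.getD f 0) else "0"])
        [p.1] ])
    [ "Table" :: title ]

-- ===== PORT B =====
def displayTable1_alt (orders : List (List String)) : List (List String) :=
  let foods := PySem.List.sorted (PySem.Set.ofList (orders.map (fun o => pyAt o 2))) (fun x => x)
  let tables := PySem.List.sorted
      (orders.foldl (fun ts o => if pyAt o 1 ∈ ts then ts else ts ++ [pyAt o 1]) [])
      (fun t => (PySem.Int.ofStr? t).getD 0)
  tables.foldl
    (fun res t =>
      res ++ [ t :: foods.map (fun f =>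
        PySem.Int.toStr (orders.foldl
          (fun acc o => if pyAt o 1 = t ∧ pyAt o 2 = f then acc + 1 else acc) 0)) ])
    [ "Table" :: foods ]

-- ===== PRECONDITION & SPEC =====
-- Pre_ excludes exactly the inputs on which Python A raises: an order row shorter than 3
-- entries (IndexError) or a table-id string int() rejects (ValueError in the sort key).
def Pre_displayTable1 (orders : List (List String)) : Prop :=
  ∀ o ∈ orders, 3 ≤ o.length ∧ (PySem.Int.ofStr? (pyAt o 1)).isSome
instance (orders : List (List String)) : Decidable (Pre_displayTable1 orders) := by
  unfold Pre_displayTable1; infer_instance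

def pvWitness_displayTable1 : List (List String) :=
  [["alice", "3", "burger"], ["bob", "1", "fries"], ["carol", "3", "fries"]]

def Spec_displayTable1 (orders : List (List String)) (out : List (List String)) : Prop :=
  out = displayTable1_alt orders
instance (orders : List (List String)) (out : List (List String)) :
    Decidable (Spec_displayTable1 orders out) := by unfold Spec_displayTable1; infer_instance

-- ===== CLAIM (what is proved, stated in full; the proofs are below) =====
def Claim_equal_displayTable1 : Prop := ∀ (orders : List (List String)),
  Dom_displayTable1 orders → Pre_displayTable1 orders →
  Spec_displayTable1 orders (displayTable1 orders)

-- ===== LEMMAS AND PROOFS =====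

theorem insertBy_map {α β : Type} (h : α → β) (cmp : β → β → Bool) (x : α) (l : List α) :
    PySem.List.insertBy cmp (h x) (l.map h)
      = (PySem.List.insertBy (fun a b => cmp (h a) (h b)) x l).map h := by
  induction l with
  | nil => simp [PySem.List.insertBy]
  | cons y ys ih => simp [PySem.List.insertBy]; split_ifs <;> simp_all

theorem sorted_map {α β κ : Type} [LT κ] [DecidableLT κ]
    (h : α → β) (key : β → κ) (l : List α) :
    PySem.List.sorted (l.map h) key
      = (PySem.List.sorted l (fun a => key (h a))).map h := by
  rw [PySem.List.sorted_eq_foldl_insertBy, PySem.List.sorted_eq_foldl_insertBy]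
  suffices H : ∀ (acc : List α),
      (l.map h).foldl (fun acc x => PySem.List.insertBy (fun a b => decide (key a < key b)) x acc) (acc.map h)
        = (l.foldl (fun acc x => PySem.List.insertBy (fun a b => decide (key (h a) < key (h b))) x acc) acc).map h by
    simpa using H []
  induction l with
  | nil => intro acc; simp
  | cons y ys ih =>
    intro acc
    simp only [List.map_cons, List.foldl_cons]
    rw [insertBy_map h (fun a b => decide (key a < key b)) y acc]
    exact ih _

def innerStep (d : PySem.Dict String (PySem.Dict String Int)) (o : List String) :
    PySem.Dict String (PySem.Dict String Int) :=
  d.modify (pyAt o 1) PySem.Dict.empty (fun m => m.modify (pyAt o 2) 0 (· + 1))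

theorem innerStep_getD (d : PySem.Dict String (PySem.Dict String Int))
    (o : List String) (t f : String) :
    ((innerStep d o).getD t PySem.Dict.empty).getD f 0
      = (d.getD t PySem.Dict.empty).getD f 0
        + (if (pyAt o 1 == t && pyAt o 2 == f) then 1 else 0) := by
  unfold innerStep
  rw [PySem.Dict.getD_modify]
  by_cases h1 : t = pyAt o 1
  · rw [if_pos h1, PySem.Dict.getD_modify, ← h1]
    by_cases h2 : f = pyAt o 2
    · rw [if_pos h2, ← h2]; simp
    · rw [if_neg h2]
      have hb : (pyAt o 2 == f) = false := by
        simp only [beq_eq_false_iff_ne, ne_eq]; exact fun h => h2 h.symm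
      simp [hb]
  · rw [if_neg h1]
    have hb : (pyAt o 1 == t) = false := by
      simp only [beq_eq_false_iff_ne, ne_eq]; exact fun h => h1 h.symm
    simp [hb]

theorem getD_getD_fold (l : List (List String)) (t f : String) :
    ∀ d : PySem.Dict String (PySem.Dict String Int),
    ((l.foldl innerStep d).getD t PySem.Dict.empty).getD f 0
      = (d.getD t PySem.Dict.empty).getD f 0
        + (l.countP (fun o => pyAt o 1 == t && pyAt o 2 == f) : Int) := by
  induction l with
  | nil => intro d; simp
  | cons o l ih =>
    intro d
    rw [List.foldl_cons, ih, innerStep_getD, List.countP_cons]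
    by_cases hp : (pyAt o 1 == t && pyAt o 2 == f) = true
    · simp [hp]
      try omega
    · simp [hp]
      try omega

theorem innerStep_contains (d : PySem.Dict String (PySem.Dict String Int))
    (o : List String) (t f : String) :
    ((innerStep d o).getD t PySem.Dict.empty).contains f
      = ((pyAt o 1 == t && pyAt o 2 == f) || (d.getD t PySem.Dict.empty).contains f) := by
  unfold innerStep
  rw [PySem.Dict.getD_modify]
  by_cases h1 : t = pyAt o 1
  · rw [if_pos h1, PySem.Dict.contains_modify, ← h1]
    simp only [beq_self_eq_true, Bool.true_and]
    rw [BEq.comm]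
  · rw [if_neg h1]
    have hb : (pyAt o 1 == t) = false := by
      simp only [beq_eq_false_iff_ne, ne_eq]; exact fun h => h1 h.symm
    simp [hb]

theorem contains_getD_fold (l : List (List String)) (t f : String) :
    ∀ d : PySem.Dict String (PySem.Dict String Int),
    ((l.foldl innerStep d).getD t PySem.Dict.empty).contains f
      = ((d.getD t PySem.Dict.empty).contains f
          || l.any (fun o => pyAt o 1 == t && pyAt o 2 == f)) := by
  induction l with
  | nil => intro d; simp
  | cons o l ih =>
    intro d
    rw [List.foldl_cons, ih, innerStep_contains, List.any_cons]
    cases hp : (pyAt o 1 == t && pyAt o 2 == f) <;>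
      simp [Bool.or_comm]

-- the cell A emits for table t, food f equals str(number of matching orders)
theorem cellA_eq (orders : List (List String)) (t f : String) :
    (if ((orders.foldl innerStep PySem.Dict.empty).getD t PySem.Dict.empty).contains f
      then PySem.Int.toStr (((orders.foldl innerStep PySem.Dict.empty).getD t PySem.Dict.empty).getD f 0)
      else "0")
      = PySem.Int.toStr (orders.countP (fun o => pyAt o 1 == t && pyAt o 2 == f) : Int) := by
  rw [getD_getD_fold, contains_getD_fold]
  simp only [PySem.Dict.getD_empty, PySem.Dict.contains_empty, Bool.false_or, zero_add]
  by_cases h : orders.any (fun o => pyAt o 1 == t && pyAt o 2 == f)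
  · simp [h]
  · have h0 : orders.countP (fun o => pyAt o 1 == t && pyAt o 2 == f) = 0 := by
      rw [List.countP_eq_zero]
      intro o ho
      have := (List.any_eq_false).1 (Bool.eq_false_iff.2 h) o ho
      simpa using this
    simp [h, h0]
    decide

-- ===== VERDICT (by name: the statement is the Claim_ definition above) =====
theorem displayTable1_spec : Claim_equal_displayTable1 := by
  intro orders _ _
  unfold Spec_displayTable1 displayTable1 displayTable1_alt
  rw [PySem.List.foldl_pyRange_pyGetD orders ([] : List String) stepA _ (le_refl 0)]
  simp only [Int.toNat_zero, List.drop_zero]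
  have hstep : stepA = fun (s : PySem.Set String × PySem.Dict String (PySem.Dict String Int)) e =>
      (PySem.Set.add s.1 (pyAt e 2), innerStep s.2 e) := rfl
  rw [hstep, PySem.List.foldl_prod_mk (f := fun s e => PySem.Set.add s (pyAt e 2)) (g := innerStep)]
  -- identify the two deduplicated key lists
  have hTitle : List.foldl (fun (s : PySem.Set String) e => s.add (pyAt e 2)) PySem.Set.empty orders
      = PySem.Set.ofList (orders.map (fun o => pyAt o 2)) := by
    rw [← PySem.Set.update_map_eq_foldl_add, PySem.Set.update_empty]
  have hTables : List.foldl (fun ts o => if pyAt o 1 ∈ ts then ts else ts ++ [pyAt o 1]) ([] : List String) orders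
      = PySem.Set.ofList (orders.map (fun o => pyAt o 1)) := by
    rw [PySem.List.foldl_congr_mem orders _ (fun ts o => PySem.Set.add ts (pyAt o 1)) []
      (fun acc x _ => (PySem.Set.add_eq_ite acc (pyAt x 1)).symm)]
    rw [← PySem.Set.update_map_eq_foldl_add]
    exact PySem.Set.update_empty _
  have hkeys : (List.foldl innerStep PySem.Dict.empty orders).keys
      = PySem.Set.ofList (orders.map (fun o => pyAt o 1)) := by
    unfold innerStep
    exact (PySem.Dict.keys_foldl_modify_key orders (fun o => pyAt o 1) PySem.Dict.empty
      (fun _ o m => m.modify (pyAt o 2) 0 (· + 1)) PySem.Dict.empty).trans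
      (PySem.Set.update_empty _)
  have hnodup : (List.foldl innerStep PySem.Dict.empty orders).keys.Nodup := by
    unfold innerStep
    exact PySem.Dict.nodup_keys_foldl_modify_key orders (fun o => pyAt o 1) PySem.Dict.empty
      (fun _ o m => m.modify (pyAt o 2) 0 (· + 1)) PySem.Dict.empty
      (by simp [PySem.Dict.keys_empty])
  have hitems : (List.foldl innerStep PySem.Dict.empty orders).items
      = (List.foldl innerStep PySem.Dict.empty orders).keys.map
          (fun t => (t, (List.foldl innerStep PySem.Dict.empty orders).getD t PySem.Dict.empty)) :=
    PySem.Dict.items_eq_map_keys _ hnodup _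
  simp only [hTitle, hTables, hitems, hkeys]
  rw [sorted_map (fun t => (t, (List.foldl innerStep PySem.Dict.empty orders).getD t PySem.Dict.empty))
      (fun p => (PySem.Int.ofStr? p.1).getD 0)]
  simp only [PySem.List.foldl_append_singleton_eq_map, List.map_map]
  congr 1
  apply List.map_congr_left
  intro t ht
  simp only [Function.comp_apply, List.singleton_append]
  congr 1
  apply List.map_congr_left
  intro f hf
  rw [cellA_eq]
  rw [PySem.List.foldl_ite_add_one (p := fun o => pyAt o 1 = t ∧ pyAt o 2 = f), zero_add]
  congr 1
  have hcnt : List.countP (fun o => decide (pyAt o 1 = t ∧ pyAt o 2 = f)) orders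
      = List.countP (fun o => pyAt o 1 == t && pyAt o 2 == f) orders := by
    apply List.countP_congr
    intro o _
    simp
  rw [hcnt]
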